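-- pv_equiv track=rewrite | github.com/chrisxue815/leetcode_python | problems/p802_dfs.py | mark_cycle
-- ===== SOURCE A (Python) =====
-- def mark_cycle(graph, in_cycle, visited, in_stack, curr):
--     if in_cycle[curr]:
--         return True
--
--     if in_stack[curr]:
--         in_cycle[curr] = True
--         return True
--
--     if visited[curr]:
--         return False
--
--     visited[curr] = True
--     in_stack[curr] = True
--
--     for outgoing in graph[curr]:
--         if mark_cycle(graph, in_cycle, visited, in_stack, outgoing):
--             in_cycle[curr] = True
--
--     in_stack[curr] = False
--     return in_cycle[curr]
-- ===== SOURCE B (Python) =====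
-- _SENTINEL = object()
--
--
-- def mark_cycle(graph, in_cycle, visited, in_stack, curr):
--     if in_cycle[curr]:
--         return True
--     if in_stack[curr]:
--         in_cycle[curr] = True
--         return True
--     if visited[curr]:
--         return False
--     visited[curr] = True
--     in_stack[curr] = True
--     stack = [(curr, iter(graph[curr]))]
--     while stack:
--         node, children = stack[-1]
--         o = next(children, _SENTINEL)
--         if o is _SENTINEL:
--             stack.pop()
--             in_stack[node] = False
--             if in_cycle[node] and stack:
--                 in_cycle[stack[-1][0]] = True
--         elif in_cycle[o]:
--             in_cycle[node] = True
--         elif in_stack[o]: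
--             in_cycle[o] = True
--             in_cycle[node] = True
--         elif visited[o]:
--             pass
--         else:
--             visited[o] = True
--             in_stack[o] = True
--             stack.append((o, iter(graph[o])))
--     return in_cycle[curr]
-- ===== Notes on version B (the rewrite author's own statement) =====
-- stated objective: alternative
-- what changed: Replaces the recursive DFS with an iterative DFS over an explicit stack of (node, child-iterator) frames: children are classified inline in one while loop and a node's cycle flag is propagated to its parent frame when the frame is popped, instead of being returned up the call chain.
-- outside the precondition, e.g. on mark_cycle([[], [5]], [False, False], [False, False], [False, False], 0): A returns False, B returns False
import Mathlib
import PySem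

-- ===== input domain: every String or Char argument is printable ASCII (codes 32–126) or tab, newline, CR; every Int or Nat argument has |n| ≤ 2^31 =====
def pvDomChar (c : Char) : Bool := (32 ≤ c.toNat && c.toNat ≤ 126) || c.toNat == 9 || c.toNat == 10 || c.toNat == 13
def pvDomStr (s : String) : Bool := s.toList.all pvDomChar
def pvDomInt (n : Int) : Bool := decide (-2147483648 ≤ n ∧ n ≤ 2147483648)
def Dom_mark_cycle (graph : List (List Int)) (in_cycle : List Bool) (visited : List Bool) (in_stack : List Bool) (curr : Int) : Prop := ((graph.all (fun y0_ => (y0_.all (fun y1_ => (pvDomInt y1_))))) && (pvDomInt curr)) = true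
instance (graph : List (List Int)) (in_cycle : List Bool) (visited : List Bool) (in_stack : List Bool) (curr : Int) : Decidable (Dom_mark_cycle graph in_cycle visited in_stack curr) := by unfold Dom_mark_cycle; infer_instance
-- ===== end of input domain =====

-- B replaces A's recursive DFS by an iterative DFS over an explicit frame stack (alternative
-- decomposition, same cost); both Pythons mutate in_cycle/visited/in_stack identically —
-- the equivalence proved here is about the RETURN value.


-- ===== PORT A =====
-- shared primitives: Python list indexing/assignment (negative indices from the end)
def getB (l : List Bool) (i : Int) : Bool := PySem.List.pyGetD l i false

def setB (l : List Bool) (i : Int) (v : Bool) : List Bool := PySem.List.pySetD l i v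

def rowOf (g : List (List Int)) (i : Int) : List Int := PySem.List.pyGetD g i []

-- A's recursive DFS; the state (in_cycle, visited, in_stack) is threaded explicitly, fuel
-- bounds the recursion depth (one unit per newly visited node; `visited.length + 1` suffices).
def goA : Nat → List (List Int) → List Bool → List Bool → List Bool → Int →
    Bool × List Bool × List Bool × List Bool
  | 0, _, ic, vis, ins, _ => (false, ic, vis, ins)
  | f + 1, g, ic, vis, ins, c =>
    if getB ic c then (true, ic, vis, ins)
    else if getB ins c then (true, setB ic c true, vis, ins)
    else if getB vis c then (false, ic, vis, ins)
    else
      let s := (rowOf g c).foldl (fun s o =>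
          let r := goA f g s.1 s.2.1 s.2.2 o
          if r.1 then (setB r.2.1 c true, r.2.2.1, r.2.2.2) else r.2)
        (ic, setB vis c true, setB ins c true)
      (getB s.1 c, s.1, s.2.1, setB s.2.2 c false)

def mark_cycle (graph : List (List Int)) (in_cycle : List Bool) (visited : List Bool) (in_stack : List Bool) (curr : Int) : Bool :=
  (goA (visited.length + 1) graph in_cycle visited in_stack curr).1

-- ===== PORT B =====
-- B's while loop over the explicit stack of (node, remaining children) frames; a child
-- iterator is the list suffix still to be consumed.  Fuel is spent only when a frame is
-- pushed (one per newly visited node; `visited.length` suffices).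
def goB : Nat → List (List Int) → List (Int × List Int) → List Bool × List Bool × List Bool →
    List Bool × List Bool × List Bool
  | _, _, [], st => st
  | fuel, g, (node, o :: cs) :: rest, (ic, vis, ins) =>
    if getB ic o then goB fuel g ((node, cs) :: rest) (setB ic node true, vis, ins)
    else if getB ins o then goB fuel g ((node, cs) :: rest) (setB (setB ic o true) node true, vis, ins)
    else if getB vis o then goB fuel g ((node, cs) :: rest) (ic, vis, ins)
    else
      match fuel with
      | 0 => (ic, vis, ins)
      | f + 1 => goB f g ((o, rowOf g o) :: (node, cs) :: rest) (ic, setB vis o true, setB ins o true)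
  | fuel, g, (node, []) :: rest, (ic, vis, ins) =>
    let ins1 := setB ins node false
    let ic1 := if getB ic node then
        (match rest with | [] => ic | (p, _) :: _ => setB ic p true)
      else ic
    goB fuel g rest (ic1, vis, ins1)
termination_by fuel _ stack _ => (fuel, stack.length, (stack.headD (0, [])).2.length)

def mark_cycle_alt (graph : List (List Int)) (in_cycle : List Bool) (visited : List Bool) (in_stack : List Bool) (curr : Int) : Bool :=
  if getB in_cycle curr then true
  -- the Python also sets in_cycle[curr] = True here; only the return value is ported
  else if getB in_stack curr then true
  else if getB visited curr then false
  else
    (goB visited.length graph [(curr, rowOf graph curr)]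
      (in_cycle, setB visited curr true, setB in_stack curr true)).1 |> (getB · curr)

-- ===== PRECONDITION & SPEC =====
def OkIdx (len : Nat) (i : Int) : Prop := -(len : Int) ≤ i ∧ i < len

def OkAll (g : List (List Int)) (li lv ls : Nat) (i : Int) : Prop :=
  OkIdx g.length i ∧ OkIdx li i ∧ OkIdx lv i ∧ OkIdx ls i

-- Pre_ keeps A away from IndexError: curr must be a valid Python index, and — unless one of
-- A's three entry guards fires, in which case A returns without touching graph — every vertex
-- index stored in graph must be a valid index into graph and the three mark lists.  This still
-- excludes some inputs A returns on (an invalid index the DFS never reaches, e.g.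
-- ([[], [5]], [False, False], [False, False], [False, False], 0)), because reachability is not
-- a closed-form condition on the input.
def Pre_mark_cycle (graph : List (List Int)) (in_cycle : List Bool) (visited : List Bool) (in_stack : List Bool) (curr : Int) : Prop :=
  OkAll graph in_cycle.length visited.length in_stack.length curr ∧
  (getB in_cycle curr = true ∨ getB in_stack curr = true ∨ getB visited curr = true ∨
    ∀ row ∈ graph, ∀ j ∈ row, OkAll graph in_cycle.length visited.length in_stack.length j)

instance (graph : List (List Int)) (in_cycle : List Bool) (visited : List Bool) (in_stack : List Bool) (curr : Int) : Decidable (Pre_mark_cycle graph in_cycle visited in_stack curr) := by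
  unfold Pre_mark_cycle OkAll OkIdx; infer_instance

def pvWitness_mark_cycle : List (List Int) × List Bool × List Bool × List Bool × Int :=
  ([[1], [0]], [false, false], [false, false], [false, false], 0)

def Spec_mark_cycle (graph : List (List Int)) (in_cycle : List Bool) (visited : List Bool) (in_stack : List Bool) (curr : Int) (out : Bool) : Prop := out = mark_cycle_alt graph in_cycle visited in_stack curr
instance (graph : List (List Int)) (in_cycle : List Bool) (visited : List Bool) (in_stack : List Bool) (curr : Int) (out : Bool) : Decidable (Spec_mark_cycle graph in_cycle visited in_stack curr out) := by unfold Spec_mark_cycle; infer_instance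

-- ===== CLAIM (what is proved, stated in full; the proofs are below) =====
def Claim_equal_mark_cycle : Prop := ∀ (graph : List (List Int)) (in_cycle : List Bool) (visited : List Bool) (in_stack : List Bool) (curr : Int), Dom_mark_cycle graph in_cycle visited in_stack curr → Pre_mark_cycle graph in_cycle visited in_stack curr → Spec_mark_cycle graph in_cycle visited in_stack curr (mark_cycle graph in_cycle visited in_stack curr)

-- ===== LEMMAS AND PROOFS =====

-- normalised (Nat) index of a valid Python index
def nrm (len : Nat) (i : Int) : Nat := if 0 ≤ i then i.toNat else len - (-i).toNat

-- number of unvisited nodes: the fuel measure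
def fc (vis : List Bool) : Nat := vis.count false

theorem pyIdx_ok {n : Nat} {i : Int} (h : OkIdx n i) :
    PySem.List.pyIdx? n i = some (nrm n i) ∧ nrm n i < n := by
  obtain ⟨h1, h2⟩ := h
  unfold PySem.List.pyIdx? nrm
  split_ifs with h3 <;> constructor <;> first | rfl | omega

theorem getB_ok {l : List Bool} {i : Int} (h : OkIdx l.length i) :
    getB l i = l.getD (nrm l.length i) false := by
  obtain ⟨he, hlt⟩ := pyIdx_ok h
  simp [getB, PySem.List.pyGetD, PySem.List.pyGet?, he, List.getD, List.getElem?_eq_getElem hlt]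

theorem setB_ok {l : List Bool} {i : Int} (h : OkIdx l.length i) (v : Bool) :
    setB l i v = l.set (nrm l.length i) v := by
  obtain ⟨he, _⟩ := pyIdx_ok h
  simp [setB, PySem.List.pySetD, PySem.List.pySet?, he]

theorem length_setB (l : List Bool) (i : Int) (v : Bool) : (setB l i v).length = l.length := by
  simp [setB, PySem.List.pySetD, PySem.List.pySet?]
  cases PySem.List.pyIdx? l.length i <;> simp

theorem count_false_set_true {l : List Bool} {n : Nat} (h : n < l.length) :
    (l.set n true).count false = l.count false - (if l[n] = false then 1 else 0) := by
  induction l generalizing n with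
  | nil => simp at h
  | cons x xs ih =>
    cases n with
    | zero =>
      cases x <;> simp [List.count]
    | succ m =>
      have hm : m < xs.length := by simpa using h
      simp only [List.set_cons_succ, List.count_cons, List.getElem_cons_succ]
      rw [ih hm]
      have hc : (if xs[m] = false then 1 else 0) ≤ xs.count false := by
        split_ifs with hf
        · exact List.count_pos_iff.mpr (by rw [← hf]; exact List.getElem_mem hm)
        · omega
      split_ifs at hc ⊢ <;> omega

theorem pyIdx_lt {n : Nat} {i : Int} {m : Nat} (h : PySem.List.pyIdx? n i = some m) : m < n := by
  unfold PySem.List.pyIdx? at h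
  split_ifs at h <;> simp_all <;> omega

theorem getB_elem {l : List Bool} {i : Int} (h : OkIdx l.length i) :
    getB l i = l[nrm l.length i]'(pyIdx_ok h).2 := by
  rw [getB_ok h, List.getD_eq_getElem _ _ (pyIdx_ok h).2]

-- setting any cell to true never increases the number of false cells
theorem fc_setB_true_le (l : List Bool) (i : Int) : fc (setB l i true) ≤ fc l := by
  unfold fc setB PySem.List.pySetD PySem.List.pySet?
  cases hx : PySem.List.pyIdx? l.length i with
  | none => simp
  | some m =>
    simp only [Option.map_some, Option.getD_some]
    rw [count_false_set_true (pyIdx_lt hx)]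
    split_ifs <;> omega

theorem fc_pos_of_false {l : List Bool} {i : Int} (h : OkIdx l.length i)
    (hf : getB l i = false) : 0 < fc l := by
  rw [getB_elem h] at hf
  exact List.count_pos_iff.mpr (by rw [← hf]; exact List.getElem_mem _)

-- a valid unvisited cell: marking it decreases fc by exactly one
theorem fc_setB_true_of_false {l : List Bool} {i : Int} (h : OkIdx l.length i)
    (hf : getB l i = false) : fc (setB l i true) + 1 = fc l := by
  have hp := fc_pos_of_false h hf
  rw [getB_elem h] at hf
  unfold fc
  rw [setB_ok h, count_false_set_true (pyIdx_ok h).2, hf]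
  unfold fc at hp
  simp
  omega

-- the body of A's for-loop, and the loop itself
def stepA (f : Nat) (g : List (List Int)) (node : Int)
    (s : List Bool × List Bool × List Bool) (o : Int) : List Bool × List Bool × List Bool :=
  let r := goA f g s.1 s.2.1 s.2.2 o
  if r.1 then (setB r.2.1 node true, r.2.2.1, r.2.2.2) else r.2

def foldA (f : Nat) (g : List (List Int)) (node : Int) (children : List Int)
    (s : List Bool × List Bool × List Bool) : List Bool × List Bool × List Bool :=
  children.foldl (stepA f g node) s

theorem goA_succ (f : Nat) (g : List (List Int)) (ic vis ins : List Bool) (c : Int) :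
    goA (f + 1) g ic vis ins c =
    (if getB ic c then (true, ic, vis, ins)
    else if getB ins c then (true, setB ic c true, vis, ins)
    else if getB vis c then (false, ic, vis, ins)
    else
      let s := foldA f g c (rowOf g c) (ic, setB vis c true, setB ins c true)
      (getB s.1 c, s.1, s.2.1, setB s.2.2 c false)) := rfl

-- lengths preserved and fc nonincreasing, for goA …
theorem goA_inv (f : Nat) (g : List (List Int)) (ic vis ins : List Bool) (c : Int) :
    ((goA f g ic vis ins c).2.1.length = ic.length ∧
     (goA f g ic vis ins c).2.2.1.length = vis.length ∧
     (goA f g ic vis ins c).2.2.2.length = ins.length) ∧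
    fc (goA f g ic vis ins c).2.2.1 ≤ fc vis := by
  induction f generalizing g ic vis ins c with
  | zero => simp [goA]
  | succ f IH =>
    have Hfold : ∀ (g : List (List Int)) (node : Int) (children : List Int)
        (ic vis ins : List Bool),
        ((foldA f g node children (ic, vis, ins)).1.length = ic.length ∧
         (foldA f g node children (ic, vis, ins)).2.1.length = vis.length ∧
         (foldA f g node children (ic, vis, ins)).2.2.length = ins.length) ∧
        fc (foldA f g node children (ic, vis, ins)).2.1 ≤ fc vis := by
      intro g node children
      induction children with
      | nil => intro ic vis ins; simp [foldA]
      | cons o cs ihc =>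
        intro ic vis ins
        have hstep : foldA f g node (o :: cs) (ic, vis, ins)
            = foldA f g node cs (stepA f g node (ic, vis, ins) o) := by
          simp [foldA]
        rw [hstep]
        obtain ⟨⟨hl1, hl2, hl3⟩, hfc⟩ := IH g ic vis ins o
        unfold stepA
        cases hr : (goA f g ic vis ins o).1 <;> simp only [hr, if_true, if_false, Bool.false_eq_true]
        · obtain ⟨⟨a1, a2, a3⟩, a4⟩ := ihc (goA f g ic vis ins o).2.1
            (goA f g ic vis ins o).2.2.1 (goA f g ic vis ins o).2.2.2
          exact ⟨⟨by rw [a1, hl1], by rw [a2, hl2], by rw [a3, hl3]⟩, le_trans a4 hfc⟩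
        · obtain ⟨⟨a1, a2, a3⟩, a4⟩ := ihc (setB (goA f g ic vis ins o).2.1 node true)
            (goA f g ic vis ins o).2.2.1 (goA f g ic vis ins o).2.2.2
          exact ⟨⟨by rw [a1, length_setB, hl1], by rw [a2, hl2], by rw [a3, hl3]⟩,
            le_trans a4 hfc⟩
    rw [goA_succ]
    split_ifs with h1 h2 h3
    · simp
    · simp [length_setB]
    · simp
    · obtain ⟨⟨a1, a2, a3⟩, a4⟩ := Hfold g c (rowOf g c) ic (setB vis c true) (setB ins c true)
      refine ⟨⟨?_, ?_, ?_⟩, ?_⟩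
      · simpa using a1
      · simpa [length_setB] using a2
      · simpa [length_setB] using a3
      · exact le_trans (by simpa using a4) (fc_setB_true_le vis c)

-- … and for A's whole for-loop
theorem foldA_inv (f : Nat) (g : List (List Int)) (node : Int) (children : List Int)
    (ic vis ins : List Bool) :
    ((foldA f g node children (ic, vis, ins)).1.length = ic.length ∧
     (foldA f g node children (ic, vis, ins)).2.1.length = vis.length ∧
     (foldA f g node children (ic, vis, ins)).2.2.length = ins.length) ∧
    fc (foldA f g node children (ic, vis, ins)).2.1 ≤ fc vis := by
  induction children generalizing ic vis ins with
  | nil => simp [foldA]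
  | cons o cs ihc =>
    have hstep : foldA f g node (o :: cs) (ic, vis, ins)
        = foldA f g node cs (stepA f g node (ic, vis, ins) o) := by
      simp [foldA]
    rw [hstep]
    obtain ⟨⟨hl1, hl2, hl3⟩, hfc⟩ := goA_inv f g ic vis ins o
    unfold stepA
    cases hr : (goA f g ic vis ins o).1 <;> simp only [hr, if_true, if_false, Bool.false_eq_true]
    · obtain ⟨⟨a1, a2, a3⟩, a4⟩ := ihc (goA f g ic vis ins o).2.1
        (goA f g ic vis ins o).2.2.1 (goA f g ic vis ins o).2.2.2
      exact ⟨⟨by rw [a1, hl1], by rw [a2, hl2], by rw [a3, hl3]⟩, le_trans a4 hfc⟩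
    · obtain ⟨⟨a1, a2, a3⟩, a4⟩ := ihc (setB (goA f g ic vis ins o).2.1 node true)
        (goA f g ic vis ins o).2.2.1 (goA f g ic vis ins o).2.2.2
      exact ⟨⟨by rw [a1, length_setB, hl1], by rw [a2, hl2], by rw [a3, hl3]⟩, le_trans a4 hfc⟩

-- what B does when it pops the frame of `node`
def finishF (node : Int) (rest : List (Int × List Int))
    (s : List Bool × List Bool × List Bool) : List Bool × List Bool × List Bool :=
  (if getB s.1 node then (match rest with | [] => s.1 | (p, _) :: _ => setB s.1 p true) else s.1,
   s.2.1, setB s.2.2 node false)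

-- one-step unfoldings of B's while loop
theorem goB_ic {ic vis ins : List Bool} {o : Int} (fuel : Nat) (g : List (List Int))
    (node : Int) (cs : List Int) (rest : List (Int × List Int)) (h : getB ic o = true) :
    goB fuel g ((node, o :: cs) :: rest) (ic, vis, ins)
      = goB fuel g ((node, cs) :: rest) (setB ic node true, vis, ins) := by
  cases fuel with
  | zero => rw [goB.eq_2]; simp [h]
  | succ f => rw [goB.eq_3]; simp [h]

theorem goB_ins {ic vis ins : List Bool} {o : Int} (fuel : Nat) (g : List (List Int))
    (node : Int) (cs : List Int) (rest : List (Int × List Int))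
    (h1 : getB ic o = false) (h2 : getB ins o = true) :
    goB fuel g ((node, o :: cs) :: rest) (ic, vis, ins)
      = goB fuel g ((node, cs) :: rest) (setB (setB ic o true) node true, vis, ins) := by
  cases fuel with
  | zero => rw [goB.eq_2]; simp [h1, h2]
  | succ f => rw [goB.eq_3]; simp [h1, h2]

theorem goB_vis {ic vis ins : List Bool} {o : Int} (fuel : Nat) (g : List (List Int))
    (node : Int) (cs : List Int) (rest : List (Int × List Int))
    (h1 : getB ic o = false) (h2 : getB ins o = false) (h3 : getB vis o = true) :
    goB fuel g ((node, o :: cs) :: rest) (ic, vis, ins)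
      = goB fuel g ((node, cs) :: rest) (ic, vis, ins) := by
  cases fuel with
  | zero => rw [goB.eq_2]; simp [h1, h2, h3]
  | succ f => rw [goB.eq_3]; simp [h1, h2, h3]

theorem goB_push {ic vis ins : List Bool} {o : Int} (f : Nat) (g : List (List Int))
    (node : Int) (cs : List Int) (rest : List (Int × List Int))
    (h1 : getB ic o = false) (h2 : getB ins o = false) (h3 : getB vis o = false) :
    goB (f + 1) g ((node, o :: cs) :: rest) (ic, vis, ins)
      = goB f g ((o, rowOf g o) :: (node, cs) :: rest) (ic, setB vis o true, setB ins o true) := by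
  rw [goB.eq_3]; simp [h1, h2, h3]

theorem goB_pop (fuel : Nat) (g : List (List Int)) (node : Int)
    (rest : List (Int × List Int)) (ic vis ins : List Bool) :
    goB fuel g ((node, []) :: rest) (ic, vis, ins)
      = goB fuel g rest (finishF node rest (ic, vis, ins)) := by
  rw [goB.eq_def]; rfl

theorem foldA_cons (f : Nat) (g : List (List Int)) (node o : Int) (cs : List Int)
    (s : List Bool × List Bool × List Bool) :
    foldA f g node (o :: cs) s = foldA f g node cs (stepA f g node s o) := by
  simp [foldA]

-- THE SIMULATION: processing one frame of B's explicit stack is A's for-loop over the same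
-- children followed by B's pop bookkeeping; B's fuel decreases by exactly the number of
-- newly visited nodes.
theorem SIM (li lv ls : Nat) (g : List (List Int))
    (hg : ∀ row ∈ g, ∀ j ∈ row, OkAll g li lv ls j) :
    ∀ (f : Nat) (children : List Int) (node : Int) (rest : List (Int × List Int))
      (ic vis ins : List Bool) (k : Nat),
    ic.length = li → vis.length = lv → ins.length = ls →
    (∀ j ∈ children, OkAll g li lv ls j) →
    fc vis < f →
    goB (fc vis + k) g ((node, children) :: rest) (ic, vis, ins)
      = goB (fc (foldA f g node children (ic, vis, ins)).2.1 + k) g rest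
          (finishF node rest (foldA f g node children (ic, vis, ins))) := by
  intro f
  induction f with
  | zero => intro children node rest ic vis ins k _ _ _ _ hfc; omega
  | succ f IHf =>
    intro children
    induction children with
    | nil =>
      intro node rest ic vis ins k h1 h2 h3 hch hfc
      rw [goB_pop]
      simp [foldA]
    | cons o cs IHcs =>
      intro node rest ic vis ins k h1 h2 h3 hch hfc
      have hco : OkAll g li lv ls o := hch o List.mem_cons_self
      have hch' : ∀ j ∈ cs, OkAll g li lv ls j := fun j hj => hch j (List.mem_cons_of_mem _ hj)
      have hoi : OkIdx ic.length o := h1 ▸ hco.2.1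
      have hov : OkIdx vis.length o := h2 ▸ hco.2.2.1
      have hos : OkIdx ins.length o := h3 ▸ hco.2.2.2
      by_cases hic : getB ic o = true
      · rw [goB_ic _ _ _ _ _ hic,
          IHcs node rest (setB ic node true) vis ins k (by rw [length_setB, h1]) h2 h3 hch' hfc,
          foldA_cons]
        have hstep : stepA (f + 1) g node (ic, vis, ins) o = (setB ic node true, vis, ins) := by
          unfold stepA; rw [goA_succ]; simp [hic]
        rw [hstep]
      · by_cases hins : getB ins o = true
        · rw [goB_ins _ _ _ _ _ (by simpa using hic) hins,
            IHcs node rest (setB (setB ic o true) node true) vis ins k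
              (by rw [length_setB, length_setB, h1]) h2 h3 hch' hfc,
            foldA_cons]
          have hstep : stepA (f + 1) g node (ic, vis, ins) o
              = (setB (setB ic o true) node true, vis, ins) := by
            unfold stepA; rw [goA_succ]; simp [hic, hins]
          rw [hstep]
        · by_cases hvis : getB vis o = true
          · rw [goB_vis _ _ _ _ _ (by simpa using hic) (by simpa using hins) hvis,
              IHcs node rest ic vis ins k h1 h2 h3 hch' hfc, foldA_cons]
            have hstep : stepA (f + 1) g node (ic, vis, ins) o = (ic, vis, ins) := by
              unfold stepA; rw [goA_succ]; simp [hic, hins, hvis]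
            rw [hstep]
          · -- descend into o
            replace hic : getB ic o = false := by simpa using hic
            replace hins : getB ins o = false := by simpa using hins
            replace hvis : getB vis o = false := by simpa using hvis
            have hfv : 0 < fc vis := fc_pos_of_false hov hvis
            have hfc1 : fc (setB vis o true) + 1 = fc vis := fc_setB_true_of_false hov hvis
            have hrow : rowOf g o ∈ g :=
              PySem.List.pyGetD_mem (xs := g) (i := o) (d := []) ⟨hco.1.1, hco.1.2⟩
            have hkey : fc vis + k = (fc (setB vis o true) + k) + 1 := by omega
            rw [hkey, goB_push _ _ _ _ _ hic hins hvis,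
              IHf (rowOf g o) o ((node, cs) :: rest) ic (setB vis o true) (setB ins o true) k
                h1 (by rw [length_setB, h2]) (by rw [length_setB, h3]) (hg _ hrow) (by omega)]
            set sF := foldA f g o (rowOf g o) (ic, setB vis o true, setB ins o true) with hsF
            obtain ⟨⟨a1, a2, a3⟩, a4⟩ :=
              foldA_inv f g o (rowOf g o) ic (setB vis o true) (setB ins o true)
            rw [← hsF] at a1 a2 a3 a4
            have hfin : finishF o ((node, cs) :: rest) sF
                = ((if getB sF.1 o then setB sF.1 node true else sF.1),
                   sF.2.1, setB sF.2.2 o false) := by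
              unfold finishF
              rfl
            rw [hfin,
              IHcs node rest (if getB sF.1 o then setB sF.1 node true else sF.1) sF.2.1
                (setB sF.2.2 o false)
                k
                (by split <;> simp [length_setB, a1, h1])
                (by rw [a2, length_setB, h2]) (by rw [length_setB, a3, length_setB, h3]) hch'
                (by omega),
              foldA_cons]
            have hstep : stepA (f + 1) g node (ic, vis, ins) o
                = ((if getB sF.1 o then setB sF.1 node true else sF.1),
                   sF.2.1, setB sF.2.2 o false) := by
              unfold stepA
              rw [goA_succ]
              simp only [hic, hins, hvis, Bool.false_eq_true, if_false, ← hsF]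
              split <;> rfl
            rw [hstep]

-- ===== VERDICT (by name: the statement is the Claim_ definition above) =====
theorem mark_cycle_spec : Claim_equal_mark_cycle := by
  intro g ic vis ins c _ hpre
  obtain ⟨hc, hrest⟩ := hpre
  unfold Spec_mark_cycle mark_cycle mark_cycle_alt
  rw [goA_succ]
  by_cases h1 : getB ic c = true
  · simp [h1]
  · by_cases h2 : getB ins c = true
    · simp [h1, h2]
    · by_cases h3 : getB vis c = true
      · simp [h1, h2, h3]
      · replace h1 : getB ic c = false := by simpa using h1
        replace h2 : getB ins c = false := by simpa using h2
        replace h3 : getB vis c = false := by simpa using h3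
        have hg : ∀ row ∈ g, ∀ j ∈ row, OkAll g ic.length vis.length ins.length j := by
          rcases hrest with h | h | h | h
          · rw [h1] at h; exact absurd h (by simp)
          · rw [h2] at h; exact absurd h (by simp)
          · rw [h3] at h; exact absurd h (by simp)
          · exact h
        simp only [h1, h2, h3, Bool.false_eq_true, if_false]
        have hcv : OkIdx vis.length c := hc.2.2.1
        have hvpos : 0 < fc vis := fc_pos_of_false hcv h3
        have h4 : fc (setB vis c true) + 1 = fc vis := fc_setB_true_of_false hcv h3
        have hle : fc vis ≤ vis.length := List.count_le_length
        have hk : vis.length = fc (setB vis c true) + (vis.length - fc (setB vis c true)) := by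
          omega
        have hrowc : rowOf g c ∈ g :=
          PySem.List.pyGetD_mem (xs := g) (i := c) (d := []) ⟨hc.1.1, hc.1.2⟩
        have hSIM := SIM ic.length vis.length ins.length g hg vis.length (rowOf g c) c [] ic
            (setB vis c true) (setB ins c true) (vis.length - fc (setB vis c true)) rfl
            (length_setB _ _ _) (length_setB _ _ _) (fun j hj => hg _ hrowc j hj) (by omega)
        rw [← hk] at hSIM
        rw [hSIM, goB.eq_1]
        unfold finishF
        cases hh : getB (foldA vis.length g c (rowOf g c) (ic, setB vis c true, setB ins c true)).1 c <;>
          simp [hh]
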